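-- pv_equiv track=rewrite | github.com/cmester0/game_experiments | PlanarGraph/Finished2.py | triangulate_graph
-- ===== SOURCE A (Python) =====
-- def calc_neighbors(v, E):
--     return [y for x, y in E if x == v] + [y for y, x in E if x == v]
--
-- def triangulate_graph(G):
--     V,E = G
--     # Cycle is tree + 1 edge (smallest is given by finding the common ancestor)
--     stk = [(0,0)]
--     visited = [False for _ in V]
--     dfs_number = [0 for _ in V]
--     dfs_num = 0
--     cycles = []
--     tree = [0 for _ in V]
--     while len(stk) > 0:
--         node, n_parrent = stk.pop()
--         if visited[node]:
--             cycles.append((node, n_parrent))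
--             continue
--         visited[node] = True
--         tree[node] = n_parrent
--
--         dfs_number[node] = dfs_num
--         dfs_num += 1
--         neighbors = calc_neighbors(node,E) # do better!
--         stk = stk + [(y,node) for y in neighbors]
--
--     Eprime = list(E)
--
--     for n, v in sorted(zip(dfs_number, V)):
--         neighbors = list(filter(lambda x: dfs_number[x] > dfs_number[v], sorted(calc_neighbors(v, E), key=lambda x: dfs_number[x]))) # do better!
--         if len(neighbors) > 0:
--             for w, z in zip(neighbors, neighbors[1:] + [neighbors[0]]):
--                 if not (w,z) in Eprime and not (z,w) in Eprime and not z == w: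
--                     Eprime.append((w,z))
--
--     return V,Eprime
-- ===== SOURCE B (Python) =====
-- def triangulate_graph(G):
--     V, E = G
--
--     # adjacency index built once (forward and reverse), instead of scanning E per node
--     def adj(pairs):
--         d = {}
--         for a, b in pairs:
--             d.setdefault(a, []).append(b)
--         return d
--
--     out_adj = adj(E)
--     in_adj = adj([(y, x) for x, y in E])
--
--     def neighbors(v):
--         return out_adj.get(v, []) + in_adj.get(v, [])
--
--     visited = [False] * len(V)
--     dfs_number = [0] * len(V)
--     counter = 0
--
--     # recursive DFS; children in reverse neighbor order (= the LIFO visit order)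
--     def dfs(node):
--         nonlocal counter
--         if visited[node]:
--             return
--         visited[node] = True
--         dfs_number[node] = counter
--         counter += 1
--         for y in reversed(neighbors(node)):
--             dfs(y)
--
--     dfs(0)
--
--     Eprime = list(E)
--     seen = set(E)
--     seen.update((y, x) for x, y in E)
--     for n, v in sorted(zip(dfs_number, V)):
--         nbrs = [x for x in sorted(neighbors(v), key=lambda x: dfs_number[x])
--                 if dfs_number[x] > dfs_number[v]]
--         m = len(nbrs)
--         for i in range(m):
--             w, z = nbrs[i], nbrs[(i + 1) % m]
--             if w != z and (w, z) not in seen: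
--                 Eprime.append((w, z))
--                 seen.add((w, z))
--                 seen.add((z, w))
--     return V, Eprime
-- ===== Notes on version B (the rewrite author's own statement) =====
-- stated objective: faster
-- what changed: Phase 1 is rewritten as a recursive DFS (children taken in reverse neighbor order) instead of A's explicit worklist stack of (node,parent) copies rebuilt by concatenation, and the graph is indexed once into forward/backward adjacency dicts plus a symmetric seen-set of edges, so A's per-node linear scans of E and per-chord membership scans of the growing Eprime list disappear.
import Mathlib
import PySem

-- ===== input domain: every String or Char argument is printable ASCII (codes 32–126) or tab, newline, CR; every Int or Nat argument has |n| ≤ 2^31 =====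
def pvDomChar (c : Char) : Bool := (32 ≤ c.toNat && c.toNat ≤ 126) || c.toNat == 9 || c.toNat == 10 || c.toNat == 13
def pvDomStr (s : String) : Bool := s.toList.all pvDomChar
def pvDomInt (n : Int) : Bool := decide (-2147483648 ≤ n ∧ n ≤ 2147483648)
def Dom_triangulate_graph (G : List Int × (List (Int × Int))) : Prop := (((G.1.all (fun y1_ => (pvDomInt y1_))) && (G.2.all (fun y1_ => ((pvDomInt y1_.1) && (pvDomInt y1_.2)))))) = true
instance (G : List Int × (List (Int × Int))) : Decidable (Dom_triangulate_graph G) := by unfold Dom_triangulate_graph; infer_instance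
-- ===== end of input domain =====

-- B rewrites phase 1 as a recursive DFS over an adjacency index (built once) and keeps chord
-- membership in a symmetric seen-set, replacing A's worklist stack and its repeated scans of E/Eprime.

-- ===== PORT A =====

-- calc_neighbors(v, E)
def calcNeighbors (v : Int) (E : List (Int × Int)) : List Int :=
  (E.filter (fun p => p.1 == v)).map (·.2) ++ (E.filter (fun p => p.2 == v)).map (·.1)

-- A's phase-1 state: (visited, dfs_number, dfs_num, cycles, tree)
abbrev TgStA := List Bool × List Int × Int × List (Int × Int) × List Int

-- visiting a false entry strictly shrinks the number of false entries (termination of the DFS loops)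
theorem tgCount_set_lt (xs : List Bool) (i : Int)
    (h : PySem.List.pyGet? xs i = some false) :
    (PySem.List.pySetD xs i true).count false < xs.count false := by
  simp only [PySem.List.pyGet?, PySem.List.pySetD, PySem.List.pySet?] at *
  rcases hk : PySem.List.pyIdx? xs.length i with _ | k
  · simp [hk] at h
  · simp only [hk, Option.bind_some, Option.map_some, Option.getD_some] at h ⊢
    have hklt : k < xs.length := by
      by_contra hge
      simp [List.getElem?_eq_none (by omega : xs.length ≤ k)] at h
    have hx : xs[k] = false := by
      rw [List.getElem?_eq_getElem hklt] at h
      exact Option.some.inj h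
    calc (xs.set k true).count false
        = ((xs.take k).count false) + ((true :: xs.drop (k+1)).count false) := by
          rw [List.set_eq_take_append_cons_drop, if_pos hklt, List.count_append]
      _ < ((xs.take k).count false) + ((false :: xs.drop (k+1)).count false) := by
          simp
      _ ≤ xs.count false := by
          conv_rhs => rw [← List.take_append_drop k xs]
          rw [List.drop_eq_getElem_cons hklt, hx]
          simp [List.count_append]

-- the while-loop of A's phase 1; `none` = an IndexError in Python (an out-of-range vertex label)
def tgLoopA (E : List (Int × Int)) (stk : List (Int × Int)) (s : TgStA) : Option TgStA :=
  match hp : PySem.List.pop? stk (-1) with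
  | none => some s
  | some ((node, par), stk') =>
    match hv : PySem.List.pyGet? s.1 node with
    | none => none
    | some true =>
        tgLoopA E stk' (s.1, s.2.1, s.2.2.1, s.2.2.2.1 ++ [(node, par)], s.2.2.2.2)
    | some false =>
        let visited' := PySem.List.pySetD s.1 node true
        let tree' := PySem.List.pySetD s.2.2.2.2 node par
        let dfs' := PySem.List.pySetD s.2.1 node s.2.2.1
        let nbrs := calcNeighbors node E
        tgLoopA E (stk' ++ nbrs.map (fun y => (y, node)))
          (visited', dfs', s.2.2.1 + 1, s.2.2.2.1, tree')
termination_by (s.1.count false, stk.length)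
decreasing_by
  · exact Prod.Lex.right _ (by
      have := PySem.List.length_of_pop?_eq_some stk hp; simp at this; omega)
  · exact Prod.Lex.left _ _ (tgCount_set_lt _ _ hv)

-- body of A's innermost loop: `if not (w,z) in Eprime and not (z,w) in Eprime and not z == w`
def tgChordStepA (Ep : List (Int × Int)) (wz : Int × Int) : List (Int × Int) :=
  if ¬ Ep.contains wz ∧ ¬ Ep.contains (wz.2, wz.1) ∧ wz.2 ≠ wz.1 then Ep ++ [wz] else Ep

-- body of A's outer phase-2 loop (one `v`)
def tgVStepA (dfsN : List Int) (E : List (Int × Int)) (Ep : List (Int × Int))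
    (nv : Int × Int) : List (Int × Int) :=
  let v := nv.2
  let nbrs := (PySem.List.sorted (calcNeighbors v E)
      (fun x => PySem.List.pyGetD dfsN x 0)).filter
      (fun x => PySem.List.pyGetD dfsN v 0 < PySem.List.pyGetD dfsN x 0)
  match nbrs with
  | [] => Ep
  | h :: _ => (nbrs.zip (nbrs.drop 1 ++ [h])).foldl tgChordStepA Ep

def triangulate_graph (G : List Int × (List (Int × Int))) : List Int × (List (Int × Int)) :=
  let V := G.1
  let E := G.2
  match tgLoopA E [(0, 0)]
      (List.replicate V.length false, List.replicate V.length (0 : Int), 0, [], []) with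
  | none => (V, E)   -- Python raises IndexError here; excluded by Pre_
  | some s =>
      (V, (PySem.List.sorted2 (s.2.1.zip V) Prod.fst Prod.snd).foldl (tgVStepA s.2.1 E) E)

-- ===== PORT B =====

-- B's phase-1 state: (visited, dfs_number, counter)
abbrev TgStB := List Bool × List Int × Int

-- mark node visited and give it the next dfs number
def tgMark (y : Int) (s : TgStB) : TgStB :=
  (PySem.List.pySetD s.1 y true, PySem.List.pySetD s.2.1 y s.2.2, s.2.2 + 1)

-- Source B's recursive dfs; a pending list fuses the recursion with its for-loop over
-- reversed neighbors.  The subtype bound on the result exists only for termination.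
def tgDfsB (nbr : Int → List Int) :
    (pending : List Int) → (s : TgStB) → Option {t : TgStB // t.1.count false ≤ s.1.count false}
  | [], s => some ⟨s, le_refl _⟩
  | y :: rest, s =>
    match hv : PySem.List.pyGet? s.1 y with
    | none => none
    | some true =>
        (tgDfsB nbr rest s).map (fun t => ⟨t.1, t.2⟩)
    | some false =>
        match tgDfsB nbr (nbr y).reverse (tgMark y s) with
        | none => none
        | some t =>
          match tgDfsB nbr rest t.1 with
          | none => none
          | some u => some ⟨u.1, by
              have h1 := t.2
              have h2 := u.2
              have h3 := tgCount_set_lt s.1 y hv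
              simp only [tgMark] at h1
              omega⟩
termination_by pending s => (s.1.count false, pending.length)
decreasing_by
  · exact Prod.Lex.right _ (by simp)
  · exact Prod.Lex.left _ _ (tgCount_set_lt _ _ hv)
  · exact Prod.Lex.left _ _ (by
      have h1 := t.2
      have h3 := tgCount_set_lt s.1 y hv
      simp only [tgMark] at h1
      omega)

-- adj(pairs) of Source B
def tgAdj (pairs : List (Int × Int)) : PySem.Dict Int (List Int) :=
  pairs.foldl (fun d p => d.modify p.1 [] (· ++ [p.2])) PySem.Dict.empty

-- body of Source B's innermost loop: `if w != z and (w, z) not in seen`, extending Eprime and seen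
def tgChordStepB (st : List (Int × Int) × PySem.Set (Int × Int)) (wz : Int × Int) :
    List (Int × Int) × PySem.Set (Int × Int) :=
  if wz.1 ≠ wz.2 ∧ ¬ st.2.contains wz
  then (st.1 ++ [wz], (st.2.add wz).add (wz.2, wz.1))
  else st

-- body of Source B's outer phase-2 loop (one `v`)
def tgVStepB (nbr : Int → List Int) (dfsN : List Int)
    (st : List (Int × Int) × PySem.Set (Int × Int)) (nv : Int × Int) :
    List (Int × Int) × PySem.Set (Int × Int) :=
  let v := nv.2
  let nbrs := (PySem.List.sorted (nbr v)
      (fun x => PySem.List.pyGetD dfsN x 0)).filter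
      (fun x => PySem.List.pyGetD dfsN v 0 < PySem.List.pyGetD dfsN x 0)
  let m : Int := (nbrs.length : Int)
  (PySem.List.pyRange 0 m 1).foldl (fun st i =>
    tgChordStepB st
      (PySem.List.pyGetD nbrs i 0, PySem.List.pyGetD nbrs (PySem.Int.mod (i + 1) m) 0)) st

def triangulate_graph_alt (G : List Int × (List (Int × Int))) : List Int × (List (Int × Int)) :=
  let V := G.1
  let E := G.2
  let outAdj := tgAdj E
  let inAdj := tgAdj (E.map (fun p => (p.2, p.1)))
  let nbr : Int → List Int := fun v => outAdj.getD v [] ++ inAdj.getD v []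
  match tgDfsB nbr [0] (List.replicate V.length false, List.replicate V.length (0 : Int), 0) with
  | none => (V, E)   -- Python raises IndexError here; excluded by Pre_
  | some t =>
    let dfsN := t.1.2.1
    let seen0 := PySem.Set.update (PySem.Set.ofList E) (E.map (fun p => (p.2, p.1)))
    (V, ((PySem.List.sorted2 (dfsN.zip V) Prod.fst Prod.snd).foldl
        (tgVStepB nbr dfsN) (E, seen0)).1)

-- ===== PRECONDITION & SPEC =====

def tgInR (n : Nat) (u : Int) : Bool := decide (-(n : Int) ≤ u ∧ u < (n : Int))

-- one closure step: add the neighbors of every in-range label already collected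
def tgStep (E : List (Int × Int)) (n : Nat) (S : PySem.Set Int) : PySem.Set Int :=
  PySem.Set.update S ((S.filter (tgInR n)).flatMap (fun u => calcNeighbors u E))

-- all labels phase 1 can index with: 0 and everything reachable from it through in-range labels
def tgClosure (V : List Int) (E : List (Int × Int)) : PySem.Set Int :=
  (tgStep E V.length)^[2 * E.length + 1] (PySem.Set.ofList [0])

-- all labels phase 2 indexes with: each edge-incident v ∈ V together with its neighbors
def tgP2 (V : List Int) (E : List (Int × Int)) : List Int :=
  V.flatMap (fun v => match calcNeighbors v E with
    | [] => []
    | nb => v :: nb)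

-- Pre_ excludes exactly the inputs on which Python A raises IndexError: some vertex label that the
-- algorithm actually indexes with (0 and its closure, or an edge-incident v ∈ V and its neighbors)
-- lies outside [-len(V), len(V)).  In-range negative labels (Python wraparound) stay inside Pre_.
def Pre_triangulate_graph (G : List Int × (List (Int × Int))) : Prop :=
  ((tgClosure G.1 G.2 ++ tgP2 G.1 G.2).all (tgInR G.1.length)) = true

instance (G : List Int × (List (Int × Int))) : Decidable (Pre_triangulate_graph G) := by
  unfold Pre_triangulate_graph; infer_instance

def pvWitness_triangulate_graph : (List Int × (List (Int × Int))) :=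
  ([0, 1, 2, 3], [(0, 1), (1, 2), (2, 0), (2, 3)])

def Spec_triangulate_graph (G : List Int × (List (Int × Int))) (out : List Int × (List (Int × Int))) : Prop := out = triangulate_graph_alt G
instance (G : List Int × (List (Int × Int))) (out : List Int × (List (Int × Int))) : Decidable (Spec_triangulate_graph G out) := by unfold Spec_triangulate_graph; infer_instance

-- ===== CLAIM (what is proved, stated in full; the proofs are below) =====
def Claim_equal_triangulate_graph : Prop := ∀ (G : List Int × (List (Int × Int))), Dom_triangulate_graph G → Pre_triangulate_graph G → Spec_triangulate_graph G (triangulate_graph G)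

-- ===== LEMMAS AND PROOFS =====

-- the projection of A's phase-1 state onto B's (cycles and tree are dead for the output)
def tgPi (s : TgStA) : TgStB := (s.1, s.2.1, s.2.2.1)

-- A's loop at the level of B's state
def tgLoopCore (E : List (Int × Int)) (stk : List (Int × Int)) (s : TgStB) : Option TgStB :=
  match hp : PySem.List.pop? stk (-1) with
  | none => some s
  | some ((node, _par), stk') =>
    match hv : PySem.List.pyGet? s.1 node with
    | none => none
    | some true => tgLoopCore E stk' s
    | some false =>
        tgLoopCore E (stk' ++ (calcNeighbors node E).map (fun y => (y, node))) (tgMark node s)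
termination_by (s.1.count false, stk.length)
decreasing_by
  · exact Prod.Lex.right _ (by
      have := PySem.List.length_of_pop?_eq_some stk hp; simp at this; omega)
  · exact Prod.Lex.left _ _ (tgCount_set_lt _ _ hv)

-- B's dfs without the termination bound
def tgDfsL (nbr : Int → List Int) (pending : List Int) (s : TgStB) : Option TgStB :=
  (tgDfsB nbr pending s).map (·.1)

theorem tgDfsL_nil (nbr : Int → List Int) (s : TgStB) : tgDfsL nbr [] s = some s := by
  simp [tgDfsL, tgDfsB]

theorem tgDfsL_cons (nbr : Int → List Int) (y : Int) (rest : List Int) (s : TgStB) :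
    tgDfsL nbr (y :: rest) s =
      match PySem.List.pyGet? s.1 y with
      | none => none
      | some true => tgDfsL nbr rest s
      | some false =>
          (tgDfsL nbr (nbr y).reverse (tgMark y s)).bind (fun t => tgDfsL nbr rest t) := by
  simp only [tgDfsL, tgDfsB]
  split <;> rename_i hv
  · simp [hv]
  · simp [hv]
  · simp only [hv]
    rcases h1 : tgDfsB nbr (nbr y).reverse (tgMark y s) with _ | t
    · simp
    · rcases h2 : tgDfsB nbr rest t.1 with _ | u <;> simp [h2]

theorem tgDfsL_count (nbr : Int → List Int) (pending : List Int) (s t : TgStB)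
    (h : tgDfsL nbr pending s = some t) : t.1.count false ≤ s.1.count false := by
  unfold tgDfsL at h
  rcases hb : tgDfsB nbr pending s with _ | u
  · simp [hb] at h
  · simp [hb] at h
    subst h
    exact u.2

theorem tgMem_of_pyGet (xs : List Bool) (i : Int) (v : Bool)
    (h : PySem.List.pyGet? xs i = some v) : v ∈ xs := by
  simp only [PySem.List.pyGet?] at h
  rcases hk : PySem.List.pyIdx? xs.length i with _ | k
  · simp [hk] at h
  · simp only [hk, Option.bind_some] at h
    exact List.mem_of_getElem? h

-- π-factoring: the cycles and tree components never influence the rest of A's loop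
theorem tgLoopA_pi (E : List (Int × Int)) (stk : List (Int × Int)) (s : TgStA) :
    Option.map tgPi (tgLoopA E stk s) = tgLoopCore E stk (tgPi s) := by
  fun_induction tgLoopA E stk s <;>
      (rw [tgLoopCore]; split <;> simp_all [tgPi, tgMark] <;> (split <;> simp_all [tgPi, tgMark]))
  all_goals rfl



theorem tgLoopCore_nil (E : List (Int × Int)) (s : TgStB) : tgLoopCore E [] s = some s := by
  rw [tgLoopCore]; rfl

theorem tgLoopCore_concat (E : List (Int × Int)) (stk : List (Int × Int)) (node par : Int)
    (s : TgStB) :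
    tgLoopCore E (stk ++ [(node, par)]) s =
      match PySem.List.pyGet? s.1 node with
      | none => none
      | some true => tgLoopCore E stk s
      | some false =>
          tgLoopCore E (stk ++ (calcNeighbors node E).map (fun y => (y, node))) (tgMark node s) := by
  rw [tgLoopCore]
  split <;> simp_all [PySem.List.pop?_last]
  split <;> simp_all

theorem tgP1 (E : List (Int × Int)) (nbr : Int → List Int)
    (hn : ∀ v, nbr v = calcNeighbors v E) :
    ∀ (N : Nat) (s : TgStB), s.1.count false ≤ N →
      ∀ (items stk : List (Int × Int)),
        tgLoopCore E (stk ++ items) s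
          = (tgDfsL nbr (items.reverse.map Prod.fst) s).bind (fun t => tgLoopCore E stk t) := by
  intro N
  induction N using Nat.strong_induction_on with
  | _ N ih =>
    intro s hs items
    induction items using List.reverseRecOn with
    | nil =>
        intro stk
        simp [tgDfsL_nil]
    | append_singleton init a ihItems =>
        intro stk
        obtain ⟨node, par⟩ := a
        rw [← List.append_assoc, tgLoopCore_concat]
        have hrev : ((init ++ [(node, par)]).reverse.map Prod.fst)
            = node :: (init.reverse.map Prod.fst) := by simp
        rw [hrev, tgDfsL_cons]
        rcases hv : PySem.List.pyGet? s.1 node with _ | b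
    -- none
        · simp
    -- some
        · cases b
          · -- false: visit and push neighbors
            dsimp only
            have hcnt : (tgMark node s).1.count false < s.1.count false :=
              tgCount_set_lt _ _ hv
            have hN : 0 < N := by
              have : false ∈ s.1 := tgMem_of_pyGet _ _ _ hv
              have : 0 < s.1.count false := List.count_pos_iff.mpr this
              omega
            have step1 := ih (N - 1) (by omega) (tgMark node s) (by omega)
              ((calcNeighbors node E).map (fun y => (y, node))) (stk ++ init)
            rw [step1]
            have hrev2 : (((calcNeighbors node E).map (fun y => (y, node))).reverse.map Prod.fst)
                = (nbr node).reverse := by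
              rw [hn]
              simp [List.map_reverse, Function.comp_def]
            rw [hrev2]
            simp only [Option.bind_assoc]
            apply Option.bind_congr
            intro t ht
            have htc : t.1.count false ≤ (tgMark node s).1.count false :=
              tgDfsL_count nbr _ _ _ ht
            exact ih (N - 1) (by omega) t (by omega) init stk
          · -- true: already visited, pop and continue
            exact ihItems stk

theorem tgNbr_eq (E : List (Int × Int)) (v : Int) :
    (tgAdj E).getD v [] ++ (tgAdj (E.map (fun p => (p.2, p.1)))).getD v [] =
      calcNeighbors v E := by
  unfold tgAdj calcNeighbors
  rw [PySem.Dict.getD_foldl_modify_append, PySem.Dict.getD_foldl_modify_append]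
  simp only [PySem.Dict.getD_empty, List.nil_append]
  congr 1
  rw [List.filter_map, List.map_map]
  rfl

theorem tgRange_map (nbrs : List Int) (h0 : Int) (t : List Int) (hne : nbrs = h0 :: t) :
    (PySem.List.pyRange 0 (nbrs.length : Int) 1).map (fun i =>
        ((PySem.List.pyGetD nbrs i 0 : Int),
          PySem.List.pyGetD nbrs (PySem.Int.mod (i + 1) (nbrs.length : Int)) 0))
      = nbrs.zip (nbrs.drop 1 ++ [h0]) := by
  have hlen : 0 < nbrs.length := by rw [hne]; simp
  apply List.ext_getElem
  · simp [PySem.List.length_pyRange_one]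
    omega
  · intro k hk1 hk2
    have hk : k < nbrs.length := by
      simpa [PySem.List.length_pyRange_one] using hk1
    rw [List.getElem_map, List.getElem_zip]
    rw [PySem.List.getElem_pyRange_one]
    have e1 : PySem.List.pyGetD nbrs ((0 : Int) + k) 0 = nbrs[k] := by
      rw [PySem.List.pyGetD_eq_getElem _ _ (by omega) (by simp; omega)]
      congr 1
      omega
    have hmod : PySem.Int.mod ((0 : Int) + k + 1) (nbrs.length : Int)
        = if k + 1 < nbrs.length then ((k + 1 : Nat) : Int) else 0 := by
      rw [PySem.Int.mod_eq_emod_of_pos (by exact_mod_cast hlen : (0:Int) < (nbrs.length : Int))]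
      split <;> rename_i hcase
      · rw [Int.emod_eq_of_lt (by omega) (by push_cast; omega)]
        push_cast; ring
      · have hEq : (0 : Int) + k + 1 = (nbrs.length : Int) := by
          push_cast; omega
        rw [hEq]
        simp
    have e2 : PySem.List.pyGetD nbrs (PySem.Int.mod ((0 : Int) + k + 1) (nbrs.length : Int)) 0
        = (nbrs.drop 1 ++ [h0])[k]'(by simp; omega) := by
      rw [hmod]
      split <;> rename_i hcase
      · rw [PySem.List.pyGetD_eq_getElem _ _ (by omega) (by push_cast; omega)]
        rw [List.getElem_append_left (by simp; omega)]
        simp only [List.getElem_drop]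
        congr 1
        omega
      · rw [PySem.List.pyGetD_eq_getElem _ _ (by omega) (by push_cast; omega)]
        rw [List.getElem_append_right (by simp; omega)]
        have hkeq : k = nbrs.length - 1 := by omega
        subst hne
        simp
    rw [e1, e2]

def tgSeenInv (Ep : List (Int × Int)) (seen : PySem.Set (Int × Int)) : Prop :=
  ∀ p : Int × Int, p ∈ seen ↔ p ∈ Ep ∨ (p.2, p.1) ∈ Ep

theorem tgInner (L : List (Int × Int)) :
    ∀ (Ep : List (Int × Int)) (seen : PySem.Set (Int × Int)), tgSeenInv Ep seen →
      (L.foldl tgChordStepA Ep = (L.foldl tgChordStepB (Ep, seen)).1) ∧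
      tgSeenInv (L.foldl tgChordStepA Ep) (L.foldl tgChordStepB (Ep, seen)).2 := by
  induction L with
  | nil => intro Ep seen h; exact ⟨rfl, h⟩
  | cons wz L ih =>
    intro Ep seen h
    have hcond : (¬ Ep.contains wz ∧ ¬ Ep.contains (wz.2, wz.1) ∧ wz.2 ≠ wz.1)
        ↔ (wz.1 ≠ wz.2 ∧ ¬ seen.contains wz) := by
      have hs := h wz
      simp only [List.contains_iff_mem, PySem.Set.contains_iff, hs]
      constructor
      · rintro ⟨a, b, c⟩
        exact ⟨fun e => c e.symm, by tauto⟩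
      · rintro ⟨a, b⟩
        rw [not_or] at b
        exact ⟨b.1, b.2, fun e => a e.symm⟩
    by_cases hc : wz.1 ≠ wz.2 ∧ ¬ seen.contains wz
    · simp only [List.foldl_cons, tgChordStepA, tgChordStepB,
        if_pos (hcond.mpr hc), if_pos hc]
      apply ih
      intro p
      have hp := h p
      constructor
      · intro hmem
        rcases (PySem.Set.mem_add _ _ _).mp hmem with hmem1 | hpe
        · rcases (PySem.Set.mem_add _ _ _).mp hmem1 with hmem2 | hpe
          · rcases hp.mp hmem2 with h1 | h1
            · exact Or.inl (List.mem_append_left _ h1)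
            · exact Or.inr (List.mem_append_left _ h1)
          · subst hpe
            exact Or.inl (List.mem_append_right _ (by simp))
        · subst hpe
          exact Or.inr (List.mem_append_right _ (by simp))
      · intro hmem
        rcases hmem with h1 | h1 <;> rcases List.mem_append.mp h1 with h2 | h2
        · exact (PySem.Set.mem_add _ _ _).mpr (Or.inl ((PySem.Set.mem_add _ _ _).mpr (Or.inl (hp.mpr (Or.inl h2)))))
        · exact (PySem.Set.mem_add _ _ _).mpr (Or.inl ((PySem.Set.mem_add _ _ _).mpr (Or.inr (by simpa using h2))))
        · exact (PySem.Set.mem_add _ _ _).mpr (Or.inl ((PySem.Set.mem_add _ _ _).mpr (Or.inl (hp.mpr (Or.inr h2)))))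
        · refine (PySem.Set.mem_add _ _ _).mpr (Or.inr ?_)
          simp at h2
          cases p; cases wz; simp_all
    · simp only [List.foldl_cons, tgChordStepA, tgChordStepB,
        if_neg (fun hx => hc (hcond.mp hx)), if_neg hc]
      exact ih _ _ h

theorem tgVStep_eq (E : List (Int × Int)) (nbr : Int → List Int)
    (hn : ∀ v, nbr v = calcNeighbors v E) (dfsN : List Int)
    (st : List (Int × Int) × PySem.Set (Int × Int)) (nv : Int × Int)
    (h : tgSeenInv st.1 st.2) :
    tgVStepA dfsN E st.1 nv = (tgVStepB nbr dfsN st nv).1 ∧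
      tgSeenInv (tgVStepA dfsN E st.1 nv) (tgVStepB nbr dfsN st nv).2 := by
  simp only [tgVStepA, tgVStepB, hn]
  rcases hnb : (PySem.List.sorted (calcNeighbors nv.2 E) (fun x => PySem.List.pyGetD dfsN x 0)).filter
      (fun x => decide (PySem.List.pyGetD dfsN nv.2 0 < PySem.List.pyGetD dfsN x 0)) with _ | ⟨h0, t⟩
  · rw [PySem.List.pyRange_one_eq_nil (by simp)]
    exact ⟨rfl, h⟩
  · have hb : ∀ (init : List (Int × Int) × PySem.Set (Int × Int)),
        (PySem.List.pyRange 0 (((h0 :: t).length : Nat) : Int) 1).foldl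
          (fun st i => tgChordStepB st
            (PySem.List.pyGetD (h0 :: t) i 0,
              PySem.List.pyGetD (h0 :: t) (PySem.Int.mod (i + 1) (((h0 :: t).length : Nat) : Int)) 0)) init
        = ((h0 :: t).zip ((h0 :: t).drop 1 ++ [h0])).foldl tgChordStepB init := by
      intro init
      rw [← tgRange_map (h0 :: t) h0 t rfl, List.foldl_map]
    rw [hb]
    exact tgInner _ st.1 st.2 h

theorem tgPhase2_eq (E : List (Int × Int)) (nbr : Int → List Int)
    (hn : ∀ v, nbr v = calcNeighbors v E) (dfsN : List Int)
    (pairs : List (Int × Int)) :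
    ∀ (Ep : List (Int × Int)) (seen : PySem.Set (Int × Int)), tgSeenInv Ep seen →
      pairs.foldl (tgVStepA dfsN E) Ep = (pairs.foldl (tgVStepB nbr dfsN) (Ep, seen)).1 := by
  suffices hsuff : ∀ (Ep : List (Int × Int)) (seen : PySem.Set (Int × Int)), tgSeenInv Ep seen →
      pairs.foldl (tgVStepA dfsN E) Ep = (pairs.foldl (tgVStepB nbr dfsN) (Ep, seen)).1 ∧
        tgSeenInv (pairs.foldl (tgVStepA dfsN E) Ep)
          (pairs.foldl (tgVStepB nbr dfsN) (Ep, seen)).2 by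
    intro Ep seen h
    exact (hsuff Ep seen h).1
  induction pairs with
  | nil => intro Ep seen h; exact ⟨rfl, h⟩
  | cons nv pairs ih =>
    intro Ep seen h
    simp only [List.foldl_cons]
    obtain ⟨h1, h2⟩ := tgVStep_eq E nbr hn dfsN (Ep, seen) nv h
    rw [h1] at h2
    rw [h1]
    exact ih _ _ h2

theorem tgSeen0_inv (E : List (Int × Int)) :
    tgSeenInv E (PySem.Set.update (PySem.Set.ofList E) (E.map (fun p => (p.2, p.1)))) := by
  intro p
  unfold PySem.Set.update
  rw [show (PySem.Set.add : PySem.Set (Int × Int) → (Int × Int) → PySem.Set (Int × Int))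
      = (fun s b => PySem.Set.add s (id b)) from rfl,
    PySem.Set.mem_foldl_add]
  rw [PySem.Set.mem_ofList]
  simp only [id_eq, List.mem_map]
  constructor
  · rintro (h1 | ⟨b, ⟨a, ha, rfl⟩, rfl⟩)
    · exact Or.inl h1
    · exact Or.inr (by simpa using ha)
  · rintro (h1 | h1)
    · exact Or.inl h1
    · exact Or.inr ⟨p, ⟨(p.2, p.1), h1, by simp⟩, rfl⟩

theorem triangulate_graph_eq_alt (G : List Int × (List (Int × Int))) :
    triangulate_graph G = triangulate_graph_alt G := by
  obtain ⟨V, E⟩ := G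
  simp only [triangulate_graph, triangulate_graph_alt]
  set nbr : Int → List Int :=
    fun v => (tgAdj E).getD v [] ++ (tgAdj (E.map (fun p => (p.2, p.1)))).getD v [] with hnbr
  have hn : ∀ v, nbr v = calcNeighbors v E := fun v => tgNbr_eq E v
  set s0B : TgStB := (List.replicate V.length false, List.replicate V.length (0 : Int), 0)
    with hs0B
  have hkey : Option.map tgPi (tgLoopA E [(0, 0)]
      (List.replicate V.length false, List.replicate V.length (0 : Int), 0, [], []))
      = tgDfsL nbr [0] s0B := by
    rw [tgLoopA_pi]
    have hstep := tgP1 E nbr hn (s0B.1.count false) s0B le_rfl [(0, 0)] []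
    simp only [List.nil_append] at hstep
    rw [show tgPi (List.replicate V.length false, List.replicate V.length (0 : Int), 0, [], [])
        = s0B from rfl, hstep]
    simp [tgLoopCore_nil]
  rcases hA : tgLoopA E [(0, 0)]
      (List.replicate V.length false, List.replicate V.length (0 : Int), 0, [], []) with _ | sA
  · rw [hA] at hkey
    rcases hB : tgDfsB nbr [0] s0B with _ | tB
    · rfl
    · rw [tgDfsL, hB] at hkey
      simp at hkey
  · rw [hA] at hkey
    rcases hB : tgDfsB nbr [0] s0B with _ | tB
    · rw [tgDfsL, hB] at hkey
      simp at hkey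
    · rw [tgDfsL, hB] at hkey
      simp only [Option.map_some] at hkey
      have hdfs : sA.2.1 = tB.1.2.1 := by
        have := congrArg (fun x => x.2.1) (Option.some.inj hkey)
        simpa [tgPi] using this
      simp only [hdfs]
      congr 1
      exact tgPhase2_eq E nbr hn tB.1.2.1 _ E _ (tgSeen0_inv E)

-- ===== VERDICT (by name: the statement is the Claim_ definition above) =====
theorem triangulate_graph_spec : Claim_equal_triangulate_graph := by
  intro G _ _
  unfold Spec_triangulate_graph
  exact triangulate_graph_eq_alt G
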